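-- pv_equiv track=rewrite | github.com/malteristo/reflow | src/research_agent_backend/core/reranker/utils.py | _infer_document_type
-- ===== SOURCE A (Python) =====
-- from typing import List, Tuple, Optional, Dict, Any
--
-- def _infer_document_type(file_path: Optional[str]) -> Optional[str]:
--     """Infer document type from file path."""
--     if not file_path:
--         return None
--
--     extension_map = {
--         '.md': 'markdown',
--         '.txt': 'text',
--         '.pdf': 'pdf',
--         '.doc': 'word',
--         '.docx': 'word',
--         '.html': 'html',
--         '.htm': 'html',
--         '.py': 'python',
--         '.js': 'javascript',
--         '.json': 'json',
--         '.csv': 'csv'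
--     }
--
--     for ext, doc_type in extension_map.items():
--         if file_path.lower().endswith(ext):
--             return doc_type
--
--     return 'unknown'
-- ===== SOURCE B (Python) =====
-- def _infer_document_type(file_path):
--     """Infer document type from file path."""
--     if not file_path:
--         return None
--
--     extension_map = {
--         '.md': 'markdown',
--         '.txt': 'text',
--         '.pdf': 'pdf',
--         '.doc': 'word',
--         '.docx': 'word',
--         '.html': 'html',
--         '.htm': 'html',
--         '.py': 'python',
--         '.js': 'javascript',
--         '.json': 'json',
--         '.csv': 'csv'
--     }
--
--     s = file_path.lower()
--     idx = s.rfind('.')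
--     if idx == -1:
--         return 'unknown'
--     return extension_map.get(s[idx:], 'unknown')
-- ===== Notes on version B (the rewrite author's own statement) =====
-- stated objective: simpler
-- what changed: Replaces the 11-way endswith scan over the extension map with a single extraction of the last-dot suffix (rfind) followed by one dict lookup.
import Mathlib
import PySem

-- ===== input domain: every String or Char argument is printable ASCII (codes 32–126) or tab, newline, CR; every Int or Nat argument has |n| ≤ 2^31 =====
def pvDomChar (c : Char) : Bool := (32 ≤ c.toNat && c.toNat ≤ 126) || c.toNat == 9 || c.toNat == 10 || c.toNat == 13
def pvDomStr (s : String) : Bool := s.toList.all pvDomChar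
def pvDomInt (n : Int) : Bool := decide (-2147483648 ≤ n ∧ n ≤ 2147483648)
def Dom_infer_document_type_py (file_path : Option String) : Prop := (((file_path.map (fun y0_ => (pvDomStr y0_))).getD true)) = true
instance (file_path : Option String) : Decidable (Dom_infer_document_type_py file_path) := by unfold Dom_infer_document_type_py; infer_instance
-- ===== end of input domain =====

-- B replaces A's linear endswith scan over the extension map by extracting the
-- last-dot suffix once (rfind + slice) and doing a single dict lookup (objective: simpler).

-- the shared extension-map dict literal (both Pythons contain the same literal)
def pvExtPairs : List (String × String) :=
  [(".md", "markdown"), (".txt", "text"), (".pdf", "pdf"), (".doc", "word"),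
   (".docx", "word"), (".html", "html"), (".htm", "html"), (".py", "python"),
   (".js", "javascript"), (".json", "json"), (".csv", "csv")]

def pvExtDict : PySem.Dict String String := PySem.Dict.ofList pvExtPairs

-- ===== PORT A =====
-- A's for-loop over extension_map.items(): first ext with file_path.lower().endswith(ext)
def pvLoopA (fp : String) : List (String × String) → String
  | [] => "unknown"
  | (ext, doc_type) :: rest =>
      if PySem.Str.endswith (PySem.Str.lower fp) ext then doc_type else pvLoopA fp rest

def infer_document_type_py (file_path : Option String) : Option String :=
  match file_path with
  | none => none
  | some fp => if fp = "" then none else some (pvLoopA fp pvExtDict.items)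

-- ===== PORT B =====
def infer_document_type_py_alt (file_path : Option String) : Option String :=
  match file_path with
  | none => none
  | some fp =>
      if fp = "" then none
      else
        let s := PySem.Str.lower fp
        let idx := PySem.Str.rfind s "."
        if idx = -1 then some "unknown"
        else some (PySem.Dict.getD pvExtDict (PySem.Str.slice s (some idx) none) "unknown")

-- ===== PRECONDITION & SPEC =====
def Spec_infer_document_type_py (file_path : Option String) (out : Option String) : Prop := out = infer_document_type_py_alt file_path
instance (file_path : Option String) (out : Option String) : Decidable (Spec_infer_document_type_py file_path out) := by unfold Spec_infer_document_type_py; infer_instance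

-- ===== CLAIM (what is proved, stated in full; the proofs are below) =====
def Claim_equal_infer_document_type_py : Prop := ∀ (file_path : Option String), Dom_infer_document_type_py file_path → Spec_infer_document_type_py file_path (infer_document_type_py file_path)

-- ===== LEMMAS AND PROOFS =====

-- rfind.go never finds '.' in a dot-free list
lemma pv_go_no_dot (s : List Char) (h : ('.' : Char) ∉ s) (k : ℕ) :
    PySem.Chars.rfind.go s ['.'] k = -1 := by
  induction k with
  | zero =>
      simp only [PySem.Chars.rfind.go]
      rw [if_neg]
      intro hp
      exact h ((List.isPrefixOf_iff_prefix.mp hp).mem (by simp))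
  | succ j ih =>
      simp only [PySem.Chars.rfind.go] at ih ⊢
      rw [if_neg, ih]
      intro hp
      exact h (List.mem_of_mem_drop ((List.isPrefixOf_iff_prefix.mp hp).mem (by simp)))

-- rfind.go on a ++ '.'::u ('.' ∉ u) returns a.length once k ≥ a.length
lemma pv_go_found (a u : List Char) (hu : ('.' : Char) ∉ u) (k : ℕ) (hk : a.length ≤ k) :
    PySem.Chars.rfind.go (a ++ '.' :: u) ['.'] k = (a.length : ℤ) := by
  induction k with
  | zero =>
      have ha : a = [] := List.eq_nil_of_length_eq_zero (Nat.le_zero.mp hk)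
      subst ha
      simp [PySem.Chars.rfind.go]
  | succ j ih =>
      simp only [PySem.Chars.rfind.go]
      rcases Nat.lt_or_ge a.length (j + 1) with hlt | hge
      · rw [if_neg, ih (Nat.lt_succ_iff.mp hlt)]
        intro hp
        have hdrop : (a ++ '.' :: u).drop (j + 1) = ('.' :: u).drop (j + 1 - a.length) := by
          rw [List.drop_append, List.drop_of_length_le (Nat.le_of_lt hlt)]
          simp
        rw [hdrop] at hp
        have hmem : ('.' : Char) ∈ ('.' :: u).drop (j + 1 - a.length) :=
          (List.isPrefixOf_iff_prefix.mp hp).mem (by simp)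
        have h1 : 1 ≤ j + 1 - a.length := by omega
        have : ('.' :: u).drop (j + 1 - a.length) = u.drop (j + 1 - a.length - 1) := by
          obtain ⟨m, hm⟩ := Nat.exists_eq_add_of_le h1
          rw [hm, Nat.add_comm 1 m, Nat.add_sub_cancel, List.drop_succ_cons]
        rw [this] at hmem
        exact hu (List.mem_of_mem_drop hmem)
      · have heq : a.length = j + 1 := Nat.le_antisymm hk hge
        rw [if_pos, heq]
        have hd : (a ++ '.' :: u).drop (j + 1) = '.' :: u := by
          rw [← heq, List.drop_left]
        rw [hd]
        simp

lemma pv_rfind_no_dot (t : List Char) (h : ('.' : Char) ∉ t) :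
    PySem.Chars.rfind t ['.'] = -1 := pv_go_no_dot t h t.length

lemma pv_rfind_found (a u : List Char) (hu : ('.' : Char) ∉ u) :
    PySem.Chars.rfind (a ++ '.' :: u) ['.'] = (a.length : ℤ) := by
  unfold PySem.Chars.rfind
  exact pv_go_found a u hu _ (by simp)

-- decomposition at the LAST dot
lemma pv_last_dot (t : List Char) (h : ('.' : Char) ∈ t) :
    ∃ a u, t = a ++ '.' :: u ∧ ('.' : Char) ∉ u := by
  induction t with
  | nil => cases h
  | cons c rest ih =>
      by_cases hr : ('.' : Char) ∈ rest
      · obtain ⟨a, u, h1, h2⟩ := ih hr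
        exact ⟨c :: a, u, by simp [h1], h2⟩
      · have hc : c = '.' := by
          rcases List.mem_cons.mp h with h' | h'
          · exact h'.symm
          · exact absurd h' hr
        exact ⟨[], rest, by simp [hc], hr⟩

lemma pv_suffix_cons (x y : List Char) (hy : ('.' : Char) ∉ y)
    (h : ('.' :: x) <:+ ('.' :: y)) : x = y := by
  obtain ⟨w, hw⟩ := h
  cases w with
  | nil => simpa using hw
  | cons c w' =>
      exfalso
      have : w' ++ '.' :: x = y := by simpa using congrArg List.tail hw
      exact hy (this ▸ (by simp : ('.' : Char) ∈ w' ++ '.' :: x))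

-- a key '.'::ks with no dot in ks is a suffix of a ++ '.'::u ('.' ∉ u) iff ks = u
lemma pv_suffix_iff (a u ks : List Char) (hu : ('.' : Char) ∉ u) (hks : ('.' : Char) ∉ ks) :
    (('.' :: ks) <:+ (a ++ '.' :: u)) ↔ ks = u := by
  constructor
  · intro hsuf
    have hsuf2 : ('.' :: u) <:+ (a ++ '.' :: u) := ⟨a, rfl⟩
    rcases List.suffix_or_suffix_of_suffix hsuf hsuf2 with h | h
    · exact pv_suffix_cons ks u hu h
    · exact (pv_suffix_cons u ks hks h).symm
  · rintro rfl
    exact ⟨a, rfl⟩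

-- A's loop condition, normalised to decide (ks = u)
lemma pv_cond_A (fp : String) (a u : List Char) (hu : ('.' : Char) ∉ u)
    (hs : (PySem.Str.lower fp).toList = a ++ '.' :: u)
    (e : String) (ks : List Char) (he : e.toList = '.' :: ks) (hks : ('.' : Char) ∉ ks) :
    PySem.Str.endswith (PySem.Str.lower fp) e = decide (ks = u) := by
  rw [PySem.Str.endswith_eq, hs, he]
  by_cases h : ks = u
  · rw [decide_eq_true h]
    exact (PySem.Chars.endswith_iff _ _).mpr ((pv_suffix_iff a u ks hu hks).mpr h)
  · rw [decide_eq_false h]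
    rcases Bool.eq_false_or_eq_true (PySem.Chars.endswith (a ++ '.' :: u) ('.' :: ks)) with hb | hb
    · exact absurd ((pv_suffix_iff a u ks hu hks).mp ((PySem.Chars.endswith_iff _ _).mp hb)) h
    · exact hb
-- B's dict-lookup condition, normalised the same way
lemma pv_cond_B (key : String) (u : List Char) (hkey : key.toList = '.' :: u)
    (e : String) (ks : List Char) (he : e.toList = '.' :: ks) :
    (e == key) = decide (ks = u) := by
  by_cases h : ks = u
  · subst h
    have hek : e = key := String.toList_inj.mp (he.trans hkey.symm)
    simp [hek]
  · rw [decide_eq_false h, beq_eq_false_iff_ne]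
    intro hek
    apply h
    have h2 : '.' :: ks = '.' :: u := by rw [← he, hek, hkey]
    simpa using h2

-- endswith is false on a dot-free string for any key containing a dot
lemma pv_ends_no_dot (fp : String) (h : ('.' : Char) ∉ (PySem.Str.lower fp).toList)
    (e : String) (hdot : ('.' : Char) ∈ e.toList) :
    PySem.Str.endswith (PySem.Str.lower fp) e = false := by
  rw [PySem.Str.endswith_eq]
  rcases Bool.eq_false_or_eq_true (PySem.Chars.endswith (PySem.Str.lower fp).toList e.toList) with hb | hb
  · exact absurd (((PySem.Chars.endswith_iff _ _).mp hb).mem hdot) h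
  · exact hb

-- ===== VERDICT (by name: the statement is the Claim_ definition above) =====
set_option maxHeartbeats 1600000 in
theorem infer_document_type_py_spec : Claim_equal_infer_document_type_py := by
  intro file_path _
  unfold Spec_infer_document_type_py infer_document_type_py infer_document_type_py_alt
  cases file_path with
  | none => rfl
  | some fp =>
      by_cases hfp : fp = ""
      · simp [hfp]
      · simp only [hfp, if_false]
        have hitems : pvExtDict.items = pvExtPairs := rfl
        rw [hitems]
        by_cases hdot : ('.' : Char) ∈ (PySem.Str.lower fp).toList
        · obtain ⟨a, u, hs, hu⟩ := pv_last_dot _ hdot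
          have hrf : PySem.Str.rfind (PySem.Str.lower fp) "." = (a.length : ℤ) := by
            rw [PySem.Str.rfind_eq, hs]
            exact pv_rfind_found a u hu
          rw [hrf, if_neg (by omega)]
          have hkey : (PySem.Str.slice (PySem.Str.lower fp) (some (a.length : ℤ)) none).toList = '.' :: u := by
            rw [PySem.Str.toList_slice, PySem.Chars.slice_eq_listSlice,
                PySem.List.slice_from_natCast, hs, List.drop_left]
          set key := PySem.Str.slice (PySem.Str.lower fp) (some (a.length : ℤ)) none with hkdef
          have hD : pvExtDict = PySem.Dict.mk pvExtPairs := rfl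
          rw [hD]
          simp only [pvExtPairs, pvLoopA, PySem.Dict.getD_eq_get?_getD, PySem.Dict.get?_mk_cons,
            pv_cond_A fp a u hu hs ".md" ['m','d'] (by decide) (by decide),
            pv_cond_A fp a u hu hs ".txt" ['t','x','t'] (by decide) (by decide),
            pv_cond_A fp a u hu hs ".pdf" ['p','d','f'] (by decide) (by decide),
            pv_cond_A fp a u hu hs ".doc" ['d','o','c'] (by decide) (by decide),
            pv_cond_A fp a u hu hs ".docx" ['d','o','c','x'] (by decide) (by decide),
            pv_cond_A fp a u hu hs ".html" ['h','t','m','l'] (by decide) (by decide),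
            pv_cond_A fp a u hu hs ".htm" ['h','t','m'] (by decide) (by decide),
            pv_cond_A fp a u hu hs ".py" ['p','y'] (by decide) (by decide),
            pv_cond_A fp a u hu hs ".js" ['j','s'] (by decide) (by decide),
            pv_cond_A fp a u hu hs ".json" ['j','s','o','n'] (by decide) (by decide),
            pv_cond_A fp a u hu hs ".csv" ['c','s','v'] (by decide) (by decide),
            pv_cond_B key u hkey ".md" ['m','d'] (by decide),
            pv_cond_B key u hkey ".txt" ['t','x','t'] (by decide),
            pv_cond_B key u hkey ".pdf" ['p','d','f'] (by decide),
            pv_cond_B key u hkey ".doc" ['d','o','c'] (by decide),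
            pv_cond_B key u hkey ".docx" ['d','o','c','x'] (by decide),
            pv_cond_B key u hkey ".html" ['h','t','m','l'] (by decide),
            pv_cond_B key u hkey ".htm" ['h','t','m'] (by decide),
            pv_cond_B key u hkey ".py" ['p','y'] (by decide),
            pv_cond_B key u hkey ".js" ['j','s'] (by decide),
            pv_cond_B key u hkey ".json" ['j','s','o','n'] (by decide),
            pv_cond_B key u hkey ".csv" ['c','s','v'] (by decide)]
          by_cases h1 : (['m','d'] : List Char) = u
          · simp [h1]
          by_cases h2 : (['t','x','t'] : List Char) = u
          · simp [h1, h2]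
          by_cases h3 : (['p','d','f'] : List Char) = u
          · simp [h1, h2, h3]
          by_cases h4 : (['d','o','c'] : List Char) = u
          · simp [h1, h2, h3, h4]
          by_cases h5 : (['d','o','c','x'] : List Char) = u
          · simp [h1, h2, h3, h4, h5]
          by_cases h6 : (['h','t','m','l'] : List Char) = u
          · simp [h1, h2, h3, h4, h5, h6]
          by_cases h7 : (['h','t','m'] : List Char) = u
          · simp [h1, h2, h3, h4, h5, h6, h7]
          by_cases h8 : (['p','y'] : List Char) = u
          · simp [h1, h2, h3, h4, h5, h6, h7, h8]
          by_cases h9 : (['j','s'] : List Char) = u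
          · simp [h1, h2, h3, h4, h5, h6, h7, h8, h9]
          by_cases h10 : (['j','s','o','n'] : List Char) = u
          · simp [h1, h2, h3, h4, h5, h6, h7, h8, h9, h10]
          by_cases h11 : (['c','s','v'] : List Char) = u
          · simp [h1, h2, h3, h4, h5, h6, h7, h8, h9, h10, h11]
          simp [h1, h2, h3, h4, h5, h6, h7, h8, h9, h10, h11, PySem.Dict.get?]
        · have hrf : PySem.Str.rfind (PySem.Str.lower fp) "." = -1 := by
            rw [PySem.Str.rfind_eq]
            exact pv_rfind_no_dot _ (by simpa using hdot)
          rw [hrf, if_pos rfl]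
          simp only [pvExtPairs, pvLoopA,
            pv_ends_no_dot fp hdot ".md" (by decide),
            pv_ends_no_dot fp hdot ".txt" (by decide),
            pv_ends_no_dot fp hdot ".pdf" (by decide),
            pv_ends_no_dot fp hdot ".doc" (by decide),
            pv_ends_no_dot fp hdot ".docx" (by decide),
            pv_ends_no_dot fp hdot ".html" (by decide),
            pv_ends_no_dot fp hdot ".htm" (by decide),
            pv_ends_no_dot fp hdot ".py" (by decide),
            pv_ends_no_dot fp hdot ".js" (by decide),
            pv_ends_no_dot fp hdot ".json" (by decide),
            pv_ends_no_dot fp hdot ".csv" (by decide),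
            Bool.false_eq_true, if_false]
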